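-- pv_equiv track=rewrite | github.com/Saravanan-246/Vijay- | backend/lexer.py | remove_multiline_comments
-- ===== SOURCE A (Python) =====
-- def remove_multiline_comments(code):
--     res = []
--     i = 0
--     in_comment = False
--
--     while i < len(code):
--         if not in_comment and code[i:i+2] == "/*":
--             in_comment = True
--             i += 2
--             continue
--
--         if in_comment and code[i:i+2] == "*/":
--             in_comment = False
--             i += 2
--             continue
--
--         if not in_comment:
--             res.append(code[i])
--
--         i += 1
--
--     return "".join(res)
-- ===== SOURCE B (Python) =====
-- def remove_multiline_comments(code):
--     parts = []
--     i = 0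
--     while True:
--         start = code.find("/*", i)
--         if start == -1:
--             parts.append(code[i:])
--             break
--         parts.append(code[i:start])
--         end = code.find("*/", start + 2)
--         if end == -1:
--             break
--         i = end + 2
--     return "".join(parts)
-- ===== Notes on version B (the rewrite author's own statement) =====
-- stated objective: faster
-- what changed: Replaced the per-character state machine (in_comment flag, char-by-char append) with str.find-based slicing: jump between '/*' and '*/' occurrences and join whole slices.
import Mathlib
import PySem

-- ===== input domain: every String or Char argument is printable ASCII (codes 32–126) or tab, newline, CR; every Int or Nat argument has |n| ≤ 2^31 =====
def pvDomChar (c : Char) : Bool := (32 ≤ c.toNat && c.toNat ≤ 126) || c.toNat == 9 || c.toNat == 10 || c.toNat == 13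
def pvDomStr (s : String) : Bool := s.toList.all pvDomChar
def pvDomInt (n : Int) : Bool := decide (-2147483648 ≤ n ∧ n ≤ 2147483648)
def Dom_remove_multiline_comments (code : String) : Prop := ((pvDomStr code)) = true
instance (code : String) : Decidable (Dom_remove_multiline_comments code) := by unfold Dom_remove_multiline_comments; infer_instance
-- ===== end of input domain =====

-- B replaces A's per-character in_comment state machine by find-and-slice jumps between
-- '/*' and '*/' occurrences, joining whole slices (objective: faster, constant-factor in Python).

-- ===== PORT A =====
-- A's while loop over index i with flag in_comment; the slice test code[i:i+2] == "/*"
-- is the two-leading-characters test, advancing = dropping the head of the remaining list.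
def pvGoA : Bool → List Char → List Char
  | _, [] => []
  | false, [c] => [c]
  | true, [_] => []
  | false, c1 :: c2 :: cs =>
    if c1 = '/' ∧ c2 = '*' then pvGoA true cs
    else c1 :: pvGoA false (c2 :: cs)
  | true, c1 :: c2 :: cs =>
    if c1 = '*' ∧ c2 = '/' then pvGoA false cs
    else pvGoA true (c2 :: cs)

def remove_multiline_comments (code : String) : String :=
  String.ofList (pvGoA false code.toList)

-- ===== PORT B =====
-- hand-port of code.find(a+b, i) followed by the two slices code[i:start] / code[end+2:]:
-- returns (the part before the first occurrence of the 2-char pattern, the part after it);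
-- none exactly when Python's find returns -1. Exact on all inputs.
def pvSplitPair (a b : Char) : List Char → Option (List Char × List Char)
  | [] => none
  | [_] => none
  | c1 :: c2 :: cs =>
    if c1 = a ∧ c2 = b then some ([], cs)
    else
      match pvSplitPair a b (c2 :: cs) with
      | none => none
      | some (p, r) => some (c1 :: p, r)

theorem pvSplitPair_length {a b : Char} : ∀ {cs p r : List Char},
    pvSplitPair a b cs = some (p, r) → r.length < cs.length := by
  intro cs
  induction cs with
  | nil => intro p r h; simp [pvSplitPair] at h
  | cons c1 cs ih =>
    intro p r h
    cases cs with
    | nil => simp [pvSplitPair] at h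
    | cons c2 cs =>
      simp only [pvSplitPair] at h
      split at h
      · cases h; simp
      · cases h' : pvSplitPair a b (c2 :: cs) with
        | none => rw [h'] at h; cases h
        | some pr =>
          rw [h'] at h
          obtain ⟨p', r'⟩ := pr
          cases h
          have := ih h'
          simpa using Nat.lt_succ_of_lt this

-- B's outer while True loop: find '/*'; if absent keep the tail slice and stop;
-- else keep the prefix slice, find '*/' after it; if absent stop; else continue past it.
def pvGoB (cs : List Char) : List Char :=
  match h1 : pvSplitPair '/' '*' cs with
  | none => cs
  | some (p, r) =>
    match h2 : pvSplitPair '*' '/' r with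
    | none => p
    | some (_, r') => p ++ pvGoB r'
termination_by cs.length
decreasing_by
  exact Nat.lt_trans (pvSplitPair_length h2) (pvSplitPair_length h1)

def remove_multiline_comments_alt (code : String) : String :=
  String.ofList (pvGoB code.toList)

-- ===== PRECONDITION & SPEC =====
def Spec_remove_multiline_comments (code : String) (out : String) : Prop := out = remove_multiline_comments_alt code
instance (code : String) (out : String) : Decidable (Spec_remove_multiline_comments code out) := by unfold Spec_remove_multiline_comments; infer_instance

-- ===== CLAIM (what is proved, stated in full; the proofs are below) =====
def Claim_equal_remove_multiline_comments : Prop := ∀ (code : String), Dom_remove_multiline_comments code → Spec_remove_multiline_comments code (remove_multiline_comments code)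

-- ===== LEMMAS AND PROOFS =====

theorem goA_open_none : ∀ {cs : List Char},
    pvSplitPair '/' '*' cs = none → pvGoA false cs = cs := by
  intro cs
  induction cs with
  | nil => intro _; rfl
  | cons c1 cs ih =>
    intro h
    cases cs with
    | nil => rfl
    | cons c2 cs =>
      simp only [pvSplitPair] at h
      split at h
      · cases h
      · cases h' : pvSplitPair '/' '*' (c2 :: cs) with
        | none =>
          rename_i hne
          simp only [pvGoA, if_neg hne]
          rw [ih h']
        | some pr => rw [h'] at h; obtain ⟨p, r⟩ := pr; cases h

theorem goA_open_some : ∀ {cs p r : List Char},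
    pvSplitPair '/' '*' cs = some (p, r) → pvGoA false cs = p ++ pvGoA true r := by
  intro cs
  induction cs with
  | nil => intro p r h; simp [pvSplitPair] at h
  | cons c1 cs ih =>
    intro p r h
    cases cs with
    | nil => simp [pvSplitPair] at h
    | cons c2 cs =>
      simp only [pvSplitPair] at h
      split at h
      · rename_i hyes
        cases h
        obtain ⟨h1, h2⟩ := hyes
        subst h1; subst h2
        simp [pvGoA]
      · rename_i hne
        cases h' : pvSplitPair '/' '*' (c2 :: cs) with
        | none => rw [h'] at h; cases h
        | some pr =>
          rw [h'] at h
          obtain ⟨p', r'⟩ := pr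
          cases h
          simp only [pvGoA, if_neg hne]
          rw [ih h']
          simp

theorem goA_close_none : ∀ {cs : List Char},
    pvSplitPair '*' '/' cs = none → pvGoA true cs = [] := by
  intro cs
  induction cs with
  | nil => intro _; rfl
  | cons c1 cs ih =>
    intro h
    cases cs with
    | nil => rfl
    | cons c2 cs =>
      simp only [pvSplitPair] at h
      split at h
      · cases h
      · cases h' : pvSplitPair '*' '/' (c2 :: cs) with
        | none =>
          rename_i hne
          simp only [pvGoA, if_neg hne]
          exact ih h'
        | some pr => rw [h'] at h; obtain ⟨p, r⟩ := pr; cases h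

theorem goA_close_some : ∀ {cs p r : List Char},
    pvSplitPair '*' '/' cs = some (p, r) → pvGoA true cs = pvGoA false r := by
  intro cs
  induction cs with
  | nil => intro p r h; simp [pvSplitPair] at h
  | cons c1 cs ih =>
    intro p r h
    cases cs with
    | nil => simp [pvSplitPair] at h
    | cons c2 cs =>
      simp only [pvSplitPair] at h
      split at h
      · rename_i hyes
        cases h
        obtain ⟨h1, h2⟩ := hyes
        subst h1; subst h2
        simp [pvGoA]
      · rename_i hne
        cases h' : pvSplitPair '*' '/' (c2 :: cs) with
        | none => rw [h'] at h; cases h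
        | some pr =>
          rw [h'] at h
          obtain ⟨p', r'⟩ := pr
          cases h
          simp only [pvGoA, if_neg hne]
          exact ih h'

theorem goA_eq_goB : ∀ (n : Nat) (cs : List Char), cs.length ≤ n → pvGoA false cs = pvGoB cs := by
  intro n
  induction n with
  | zero =>
    intro cs hlen
    have : cs = [] := List.eq_nil_of_length_eq_zero (Nat.le_zero.mp hlen)
    subst this
    rw [pvGoB]
    split
    · rfl
    · rename_i p r h1
      simp [pvSplitPair] at h1
  | succ n ih =>
    intro cs hlen
    rw [pvGoB]
    split
    · rename_i h1
      exact goA_open_none h1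
    · rename_i p r h1
      split
      · rename_i h2
        rw [goA_open_some h1, goA_close_none h2]
        simp
      · rename_i q r' h2
        rw [goA_open_some h1, goA_close_some h2]
        have hr : r.length < cs.length := pvSplitPair_length h1
        have hr' : r'.length < r.length := pvSplitPair_length h2
        rw [ih r' (by omega)]

-- ===== VERDICT (by name: the statement is the Claim_ definition above) =====
theorem remove_multiline_comments_spec : Claim_equal_remove_multiline_comments := by
  intro code _
  unfold Spec_remove_multiline_comments remove_multiline_comments remove_multiline_comments_alt
  rw [goA_eq_goB code.toList.length code.toList (le_refl _)]
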